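-- pv_equiv track=rewrite | github.com/masahiro-999/atcoder-workspace | cf16-final/B/main.py | solve
-- ===== SOURCE A (Python) =====
-- from collections import deque, Counter, defaultdict
--
-- def solve(N: int):
--     d = defaultdict(set)
--     s = 0
--     i = 1
--     while s < N:
--         s += i
--         i += 1
--     max_i = i
--     ans = set([i for i in range(1,max_i)])
--     if s-N > 0:
--         ans.remove(s - N)
--     return list(ans)
-- ===== SOURCE B (Python) =====
-- def _tri(k):
--     return k * (k + 1) // 2
--
-- def solve(N: int):
--     if N <= 0:
--         return []
--     # k = smallest index with k*(k+1)//2 >= N, found by doubling + binary search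
--     hi = 1
--     while _tri(hi) < N:
--         hi *= 2
--     lo = 0
--     while lo < hi:
--         mid = (lo + hi) // 2
--         if N <= _tri(mid):
--             hi = mid
--         else:
--             lo = mid + 1
--     d = _tri(lo) - N
--     return [x for x in range(1, lo + 1) if x != d]
-- ===== Notes on version B (the rewrite author's own statement) =====
-- stated objective: faster
-- what changed: Replaces A's one-by-one summation loop for the least index whose triangular number reaches N by exponential doubling plus binary search over the triangular numbers, and emits the range minus the deficit via a list comprehension instead of building a set and calling remove.
import Mathlib
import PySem

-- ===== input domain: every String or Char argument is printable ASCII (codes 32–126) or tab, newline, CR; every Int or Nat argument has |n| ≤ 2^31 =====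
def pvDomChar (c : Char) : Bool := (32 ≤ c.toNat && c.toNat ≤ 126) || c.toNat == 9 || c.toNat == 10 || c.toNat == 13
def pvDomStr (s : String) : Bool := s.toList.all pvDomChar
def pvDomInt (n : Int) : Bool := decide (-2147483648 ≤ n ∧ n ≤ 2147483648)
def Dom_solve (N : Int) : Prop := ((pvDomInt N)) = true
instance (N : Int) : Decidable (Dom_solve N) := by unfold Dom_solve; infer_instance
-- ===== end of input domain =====

-- B finds the same smallest triangular-number index by exponential doubling plus binary
-- search instead of A's one-by-one summation loop, and emits the answer by filtering the
-- range instead of building a set and removing from it.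

-- ===== PORT A =====
-- while s < N: s += i; i += 1 — fuel (N.toNat + 1) only bounds the recursion; each
-- iteration raises s by i ≥ 1, so the fuel is never exhausted and the guard is exact.
def solveLoop : Nat → Int → Int → Int → Int × Int
  | 0, _, s, i => (s, i)
  | f + 1, N, s, i => if s < N then solveLoop f N (s + i) (i + 1) else (s, i)

def solve (N : Int) : List Int :=
  let p := solveLoop (N.toNat + 1) N 0 1
  let s := p.1
  let max_i := p.2
  let ans := PySem.Set.ofList ((PySem.List.pyRange 1 max_i 1).map (fun i => i))
  -- list(ans): for these contiguous small positive ints CPython's set iterates in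
  -- ascending order, which is exactly the first-insertion order PySem.Set keeps.
  -- ans.remove(s - N): total form; `none` (KeyError) happens only outside Pre_solve.
  if s - N > 0 then (PySem.Set.remove? ans (s - N)).getD ans else ans

-- ===== PORT B =====
def tri (k : Int) : Int := PySem.Int.floordiv (k * (k + 1)) 2

-- while tri hi < N: hi *= 2 — fuel (N.toNat + 1) only bounds the recursion (hi doubles,
-- and tri hi ≥ hi once hi ≥ 1, so far fewer than N steps are ever taken).
def growHi : Nat → Int → Int → Int
  | 0, _, hi => hi
  | f + 1, N, hi => if tri hi < N then growHi f N (hi * 2) else hi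

-- while lo < hi: mid = (lo+hi)//2; if N <= tri mid: hi = mid else lo = mid+1
-- fuel only bounds the recursion; (hi - lo) shrinks every step.
def bsearch : Nat → Int → Int → Int → Int
  | 0, _, lo, _ => lo
  | f + 1, N, lo, hi =>
    if lo < hi then
      let mid := PySem.Int.floordiv (lo + hi) 2
      if N ≤ tri mid then bsearch f N lo mid else bsearch f N (mid + 1) hi
    else lo

def solve_alt (N : Int) : List Int :=
  if N ≤ 0 then []
  else
    let hi := growHi (N.toNat + 1) N 1
    let k := bsearch (hi.toNat + 1) N 0 hi
    let d := tri k - N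
    (PySem.List.pyRange 1 (k + 1) 1).filter (fun x => x != d)

-- ===== PRECONDITION & SPEC =====
-- Pre_ excludes negative N, on which A raises KeyError (removing the positive deficit from an empty set).
def Pre_solve (N : Int) : Prop := 0 ≤ N
instance (N : Int) : Decidable (Pre_solve N) := by unfold Pre_solve; infer_instance
def pvWitness_solve : Int := (7)

def Spec_solve (N : Int) (out : List Int) : Prop := out = solve_alt N
instance (N : Int) (out : List Int) : Decidable (Spec_solve N out) := by unfold Spec_solve; infer_instance

-- ===== CLAIM (what is proved, stated in full; the proofs are below) =====
def Claim_equal_solve : Prop := ∀ (N : Int), Dom_solve N → Pre_solve N → Spec_solve N (solve N)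

-- ===== LEMMAS AND PROOFS =====

lemma tri_two_mul (k : Int) : 2 * tri k = k * (k + 1) := by
  obtain ⟨m, hm⟩ := Int.even_mul_succ_self k
  unfold tri
  rw [PySem.Int.floordiv_eq_ediv_of_pos (by norm_num), hm]
  omega

lemma tri_succ (k : Int) : tri k = tri (k - 1) + k := by
  have h1 := tri_two_mul k
  have h2 := tri_two_mul (k - 1)
  have : (k - 1) * (k - 1 + 1) = k * (k + 1) - 2 * k := by ring
  omega

lemma tri_mono {a b : Int} (h0 : 0 ≤ a) (h : a ≤ b) : tri a ≤ tri b := by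
  have h1 := tri_two_mul a
  have h2 := tri_two_mul b
  nlinarith

lemma tri_ge_self {k : Int} (h : 1 ≤ k) : k ≤ tri k := by
  have h1 := tri_two_mul k
  nlinarith

lemma tri_zero : tri 0 = 0 := by decide

-- A's loop: starting from s = tri (i-1), it stops at the first i whose running sum reaches N.
lemma solveLoop_spec (N : Int) : ∀ (f : Nat) (s i : Int), 1 ≤ i → s = tri (i - 1) →
    (i = 1 ∨ tri (i - 2) < N) → (N - s).toNat < f →
    ¬ (solveLoop f N s i).1 < N ∧
    (solveLoop f N s i).1 = tri ((solveLoop f N s i).2 - 1) ∧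
    ((solveLoop f N s i).2 = 1 ∨ tri ((solveLoop f N s i).2 - 2) < N) ∧
    i ≤ (solveLoop f N s i).2 := by
  intro f
  induction f with
  | zero => intro s i _ _ _ hf; omega
  | succ f ih =>
    intro s i hi hs hprev hf
    by_cases hlt : s < N
    · have hstep : s + i = tri i := by have := tri_succ i; omega
      have h1 : i + 1 - 1 = i := by ring
      have h2 : i + 1 - 2 = i - 1 := by ring
      have hrec := ih (s + i) (i + 1) (by omega)
        (by rw [h1]; omega)
        (by right; rw [h2]; omega)
        (by omega)
      have hunf : solveLoop (f + 1) N s i = solveLoop f N (s + i) (i + 1) := by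
        simp [solveLoop, hlt]
      rw [hunf]
      exact ⟨hrec.1, hrec.2.1, hrec.2.2.1, by have := hrec.2.2.2; omega⟩
    · have hunf : solveLoop (f + 1) N s i = (s, i) := by
        simp [solveLoop, hlt]
      rw [hunf]
      exact ⟨hlt, hs, hprev, le_refl i⟩

-- B's doubling loop reaches some hi ≥ 1 with N ≤ tri hi.
lemma growHi_spec (N : Int) : ∀ (f : Nat) (hi : Int), 1 ≤ hi → (N - hi).toNat < f →
    N ≤ tri (growHi f N hi) ∧ 1 ≤ growHi f N hi := by
  intro f
  induction f with
  | zero => intro hi _ hf; omega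
  | succ f ih =>
    intro hi h1 hf
    by_cases hlt : tri hi < N
    · have hge := tri_ge_self h1
      have hunf : growHi (f + 1) N hi = growHi f N (hi * 2) := by simp [growHi, hlt]
      rw [hunf]
      exact ih (hi * 2) (by omega) (by omega)
    · have hunf : growHi (f + 1) N hi = hi := by simp [growHi, hlt]
      rw [hunf]
      exact ⟨by omega, h1⟩

-- B's binary search keeps N ≤ tri hi and (lo = 0 ∨ tri (lo-1) < N), ending at lo = hi.
lemma bsearch_spec (N : Int) : ∀ (f : Nat) (lo hi : Int), 0 ≤ lo → lo ≤ hi → N ≤ tri hi →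
    (lo = 0 ∨ tri (lo - 1) < N) → (hi - lo).toNat < f →
    0 ≤ bsearch f N lo hi ∧ N ≤ tri (bsearch f N lo hi) ∧
    (bsearch f N lo hi = 0 ∨ tri (bsearch f N lo hi - 1) < N) := by
  intro f
  induction f with
  | zero => intro lo hi _ _ _ _ hf; omega
  | succ f ih =>
    intro lo hi h0 hle hhi hlo hf
    by_cases hlt : lo < hi
    · have hmid := PySem.Int.floordiv_two_mid_bounds (le_of_lt hlt)
      have hmlt : PySem.Int.floordiv (lo + hi) 2 < hi :=
        (PySem.Int.floordiv_lt_iff_lt_mul (by norm_num)).mpr (by omega)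
      by_cases hN : N ≤ tri (PySem.Int.floordiv (lo + hi) 2)
      · have hunf : bsearch (f + 1) N lo hi = bsearch f N lo (PySem.Int.floordiv (lo + hi) 2) := by
          simp only [bsearch, if_pos hlt, if_pos hN]
        rw [hunf]
        exact ih lo (PySem.Int.floordiv (lo + hi) 2) h0 (by omega) hN hlo (by omega)
      · have hunf : bsearch (f + 1) N lo hi = bsearch f N (PySem.Int.floordiv (lo + hi) 2 + 1) hi := by
          simp only [bsearch, if_pos hlt, if_neg hN]
        rw [hunf]
        refine ih (PySem.Int.floordiv (lo + hi) 2 + 1) hi (by omega) (by omega) hhi ?_ (by omega)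
        right
        have hm1 : PySem.Int.floordiv (lo + hi) 2 + 1 - 1 = PySem.Int.floordiv (lo + hi) 2 := by ring
        rw [hm1]
        omega
    · have heq : lo = hi := by omega
      have hunf : bsearch (f + 1) N lo hi = lo := by simp [bsearch, hlt]
      rw [hunf]
      exact ⟨h0, by rw [heq]; exact hhi, hlo⟩

-- the smallest k ≥ 1 with tri (k-1) < N ≤ tri k is unique
lemma k_unique {N a b : Int} (ha1 : 1 ≤ a) (hb1 : 1 ≤ b)
    (ha : tri (a - 1) < N ∧ N ≤ tri a) (hb : tri (b - 1) < N ∧ N ≤ tri b) : a = b := by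
  by_contra hne
  rcases lt_or_gt_of_ne hne with h | h
  · have := tri_mono (a := a) (b := b - 1) (by omega) (by omega)
    omega
  · have := tri_mono (a := b) (b := a - 1) (by omega) (by omega)
    omega

-- the common tail: both emit range(1, k+1) minus (tri k - N)
lemma tail_eq (N k : Int) (_hk : 1 ≤ k) (hlo : tri (k - 1) < N) (hhi : N ≤ tri k) :
    (if tri k - N > 0 then
      (PySem.Set.remove? (PySem.Set.ofList ((PySem.List.pyRange 1 (k + 1) 1).map (fun i => i))) (tri k - N)).getD
        (PySem.Set.ofList ((PySem.List.pyRange 1 (k + 1) 1).map (fun i => i)))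
     else PySem.Set.ofList ((PySem.List.pyRange 1 (k + 1) 1).map (fun i => i)))
    = (PySem.List.pyRange 1 (k + 1) 1).filter (fun x => x != (tri k - N)) := by
  have hmap : (PySem.List.pyRange 1 (k + 1) 1).map (fun i => i) = PySem.List.pyRange 1 (k + 1) 1 :=
    List.map_id' _
  have hof : PySem.Set.ofList (PySem.List.pyRange 1 (k + 1) 1) = PySem.List.pyRange 1 (k + 1) 1 :=
    PySem.Set.ofList_eq_self_of_nodup _ (PySem.List.nodup_pyRange_one 1 (k + 1))
  rw [hmap, hof]
  have hdlt : tri k - N < k := by have := tri_succ k; omega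
  by_cases hd : tri k - N > 0
  · rw [if_pos hd]
    have hmem : tri k - N ∈ PySem.List.pyRange 1 (k + 1) 1 := by
      rw [PySem.List.mem_pyRange_one]; omega
    rw [PySem.Set.remove?_of_mem hmem]
    simp only [Option.getD_some]
    unfold PySem.Set.discard
    rfl
  · rw [if_neg hd]
    symm
    rw [List.filter_eq_self]
    intro a ha
    rw [PySem.List.mem_pyRange_one] at ha
    simp only [bne_iff_ne, ne_eq]
    omega

theorem solve_eq_alt (N : Int) (hpre : 0 ≤ N) : solve N = solve_alt N := by
  by_cases hN : N ≤ 0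
  · have : N = 0 := le_antisymm hN hpre
    subst this
    decide
  · rw [not_le] at hN
    -- A side
    have hA := solveLoop_spec N (N.toNat + 1) 0 1 (by omega)
      (by rw [show (1:Int) - 1 = 0 from rfl, tri_zero]) (Or.inl rfl) (by omega)
    set r := solveLoop (N.toNat + 1) N 0 1 with hr
    obtain ⟨hA1, hA2, hA3, hA4⟩ := hA
    have hr2 : 2 ≤ r.2 := by
      by_contra hc
      have h1 : r.2 = 1 := by omega
      rw [h1, show (1:Int) - 1 = 0 from rfl, tri_zero] at hA2
      omega
    have hAk : tri (r.2 - 1 - 1) < N ∧ N ≤ tri (r.2 - 1) := by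
      refine ⟨?_, by omega⟩
      rcases hA3 with h | h
      · omega
      · rw [show r.2 - 1 - 1 = r.2 - 2 by ring]
        exact h
    -- B side
    have hG := growHi_spec N (N.toNat + 1) 1 (by omega) (by omega)
    set hi := growHi (N.toNat + 1) N 1 with hhi
    have hB := bsearch_spec N (hi.toNat + 1) 0 hi (by omega) (by omega) hG.1 (Or.inl rfl) (by omega)
    set k := bsearch (hi.toNat + 1) N 0 hi with hk
    obtain ⟨hB1, hB2, hB3⟩ := hB
    have hk1 : 1 ≤ k := by
      by_contra hc
      have h0 : k = 0 := by omega
      rw [h0, tri_zero] at hB2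
      omega
    have hBk : tri (k - 1) < N ∧ N ≤ tri k := by
      rcases hB3 with h | h
      · omega
      · exact ⟨h, hB2⟩
    -- the two indices coincide
    have heq : r.2 - 1 = k := k_unique (by omega) hk1 hAk hBk
    have hpair : solveLoop (N.toNat + 1) N 0 1 = (tri k, k + 1) := by
      rw [← hr]
      exact Prod.ext_iff.mpr ⟨by rw [hA2, heq], by omega⟩
    have hL : solve N =
        (if tri k - N > 0 then
          (PySem.Set.remove? (PySem.Set.ofList ((PySem.List.pyRange 1 (k + 1) 1).map (fun i => i))) (tri k - N)).getD
            (PySem.Set.ofList ((PySem.List.pyRange 1 (k + 1) 1).map (fun i => i)))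
         else PySem.Set.ofList ((PySem.List.pyRange 1 (k + 1) 1).map (fun i => i))) := by
      unfold solve
      rw [hpair]
    have hR : solve_alt N = (PySem.List.pyRange 1 (k + 1) 1).filter (fun x => x != (tri k - N)) := by
      unfold solve_alt
      rw [if_neg (by omega : ¬ N ≤ 0)]
    rw [hL, hR]
    exact tail_eq N k hk1 hBk.1 hBk.2

-- ===== VERDICT (by name: the statement is the Claim_ definition above) =====
theorem solve_spec : Claim_equal_solve := by
  unfold Claim_equal_solve
  intro N _ hpre
  unfold Spec_solve
  exact solve_eq_alt N hpre
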